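-- pv_equiv track=rewrite | github.com/conchcoin/xugenping-blockchain | blockchain/config/token.py | get_total_supply_at_height
-- ===== SOURCE A (Python) =====
-- TOTAL_SUPPLY = 19840228
--
-- INITIAL_BLOCK_REWARD = 50
--
-- HALVING_PERIOD = 6 * 30 * 24 * 6  # 6 months * 30 days * 24 hours * 6 blocks per hour
--
-- def get_block_reward(block_height: int) -> int:
--     """Calculate block reward based on block height"""
--     halvings = block_height // HALVING_PERIOD
--     reward = INITIAL_BLOCK_REWARD
--
--     # Apply halvings
--     for _ in range(halvings):
--         reward = reward // 2
--
--     return reward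
--
-- def get_total_supply_at_height(block_height: int) -> int:
--     """Calculate total supply at given block height"""
--     total = 0
--     current_height = 0
--
--     while current_height <= block_height:
--         reward = get_block_reward(current_height)
--         total += reward
--         current_height += 1
--
--     return min(total, TOTAL_SUPPLY)
-- ===== SOURCE B (Python) =====
-- TOTAL_SUPPLY = 19840228
-- INITIAL_BLOCK_REWARD = 50
-- HALVING_PERIOD = 6 * 30 * 24 * 6
--
-- def get_total_supply_at_height(block_height: int) -> int:
--     """Closed-form per halving period: each period contributes reward * (number of
--     its blocks at or below block_height); stop once the reward has halved to zero."""
--     total = 0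
--     reward = INITIAL_BLOCK_REWARD
--     start = 0
--     while reward > 0 and start <= block_height:
--         last = min(start + HALVING_PERIOD - 1, block_height)
--         total += reward * (last - start + 1)
--         reward //= 2
--         start += HALVING_PERIOD
--     return min(total, TOTAL_SUPPLY)
-- ===== Notes on version B (the rewrite author's own statement) =====
-- stated objective: faster
-- what changed: Replaces A's per-block loop (which recomputes the reward by repeated halving at every single height) with one closed-form term per halving period, stopping as soon as the reward has halved to zero.
import Mathlib
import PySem

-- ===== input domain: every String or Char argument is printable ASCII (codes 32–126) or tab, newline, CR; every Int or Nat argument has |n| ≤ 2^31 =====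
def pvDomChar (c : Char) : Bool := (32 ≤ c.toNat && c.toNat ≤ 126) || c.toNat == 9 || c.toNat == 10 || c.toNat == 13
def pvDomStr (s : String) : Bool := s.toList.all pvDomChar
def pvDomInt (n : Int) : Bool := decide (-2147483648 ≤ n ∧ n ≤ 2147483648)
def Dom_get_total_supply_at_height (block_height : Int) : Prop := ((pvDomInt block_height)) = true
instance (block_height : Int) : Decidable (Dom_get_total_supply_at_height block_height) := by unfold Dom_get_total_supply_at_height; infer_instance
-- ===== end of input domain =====

-- B replaces A's per-block loop (reward recomputed by repeated halving at every height)
-- by one closed-form term per halving period, stopping once the reward is zero: faster (asymptotic).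

-- ===== PORT A =====
-- `for _ in range(halvings): reward = reward // 2`
def pvHalve : Nat → Int → Int
  | 0, r => r
  | n + 1, r => pvHalve n (PySem.Int.floordiv r 2)

def get_block_reward (block_height : Int) : Int :=
  pvHalve (PySem.Int.floordiv block_height (6 * 30 * 24 * 6)).toNat 50

-- `while current_height <= block_height: …`; fuel = number of iterations
def pvLoopA : Nat → Int → Int → Int → Int
  | 0, total, _, _ => total
  | f + 1, total, current_height, block_height =>
    if current_height ≤ block_height then
      pvLoopA f (total + get_block_reward current_height) (current_height + 1) block_height
    else total

def get_total_supply_at_height (block_height : Int) : Int :=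
  min (pvLoopA (block_height + 1).toNat 0 0 block_height) 19840228

-- ===== PORT B =====
-- `while reward > 0 and start <= block_height: …`; the reward halves each pass
-- (50,25,12,6,3,1,0), so 7 fuel is never exhausted while the guard holds
def pvLoopB : Nat → Int → Int → Int → Int → Int
  | 0, total, _, _, _ => total
  | f + 1, total, reward, start, block_height =>
    if reward > 0 ∧ start ≤ block_height then
      pvLoopB f (total + reward * (min (start + 25920 - 1) block_height - start + 1))
        (PySem.Int.floordiv reward 2) (start + 25920) block_height
    else total

def get_total_supply_at_height_alt (block_height : Int) : Int :=
  min (pvLoopB 7 0 50 0 block_height) 19840228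

-- ===== PRECONDITION & SPEC =====
def Spec_get_total_supply_at_height (block_height : Int) (out : Int) : Prop := out = get_total_supply_at_height_alt block_height
instance (block_height : Int) (out : Int) : Decidable (Spec_get_total_supply_at_height block_height out) := by unfold Spec_get_total_supply_at_height; infer_instance

-- ===== CLAIM (what is proved, stated in full; the proofs are below) =====
def Claim_equal_get_total_supply_at_height : Prop := ∀ (block_height : Int), Dom_get_total_supply_at_height block_height → Spec_get_total_supply_at_height block_height (get_total_supply_at_height block_height)

-- ===== LEMMAS AND PROOFS =====

-- the per-period reward: 50 halved k times
def pvQ (k : Nat) : Int := pvHalve k 50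

-- sum of rewards of blocks from period-k start (height 25920*k) up to height h
def pvF (k : Nat) (h : Int) : Int :=
  ∑ i ∈ Finset.range ((h + 1 - 25920 * (k : Int)).toNat), pvQ (k + i / 25920)

theorem pvHalve_succ' (n : Nat) (r : Int) :
    pvHalve (n + 1) r = PySem.Int.floordiv (pvHalve n r) 2 := by
  induction n generalizing r with
  | zero => rfl
  | succ m ih => simp only [pvHalve]; exact ih _

theorem pvQ_nonneg (k : Nat) : 0 ≤ pvQ k := by
  induction k with
  | zero => decide
  | succ m ih =>
    unfold pvQ at *
    rw [pvHalve_succ', PySem.Int.floordiv_eq_ediv_of_pos (by norm_num)]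
    exact Int.ediv_nonneg ih (by norm_num)

theorem pvQ_add_zero (k m : Nat) (h : pvQ k = 0) : pvQ (k + m) = 0 := by
  induction m with
  | zero => exact h
  | succ n ih =>
    unfold pvQ at *
    rw [← Nat.add_assoc, pvHalve_succ', ih]
    decide

theorem pvF_zero_of_qzero (k : Nat) (h : Int) (hq : pvQ k = 0) : pvF k h = 0 := by
  unfold pvF
  exact Finset.sum_eq_zero fun i _ => pvQ_add_zero k (i / 25920) hq

theorem pvF_zero_of_lt (k : Nat) (h : Int) (hlt : h < 25920 * (k : Int)) : pvF k h = 0 := by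
  unfold pvF
  have : (h + 1 - 25920 * (k : Int)).toNat = 0 := by omega
  rw [this]; simp

theorem pvF_step (k : Nat) (h : Int) (hk : 25920 * (k : Int) ≤ h) :
    pvF k h = pvQ k * (min (25920 * (k : Int) + 25920 - 1) h - 25920 * (k : Int) + 1)
      + pvF (k + 1) h := by
  by_cases hbig : 25920 * (k : Int) + 25920 ≤ h
  · -- period k is complete: first 25920 terms are pvQ k, the rest form pvF (k+1) h
    have hm : (h + 1 - 25920 * (k : Int)).toNat
        = 25920 + (h + 1 - 25920 * ((k : Int) + 1)).toNat := by omega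
    have hmin : min (25920 * (k : Int) + 25920 - 1) h = 25920 * (k : Int) + 25920 - 1 := by omega
    unfold pvF
    rw [hm, Finset.sum_range_add]
    have h1 : ∑ i ∈ Finset.range 25920, pvQ (k + i / 25920)
        = 25920 * pvQ k := by
      rw [Finset.sum_congr rfl (fun i hi => by
        rw [Nat.div_eq_of_lt (Finset.mem_range.mp hi)])]
      simp [Finset.sum_const, mul_comm]
    have h2 : ∀ j ∈ Finset.range ((h + 1 - 25920 * ((k : Int) + 1)).toNat),
        pvQ (k + (25920 + j) / 25920) = pvQ ((k + 1) + j / 25920) := by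
      intro j _
      have : (25920 + j) / 25920 = j / 25920 + 1 := by
        rw [Nat.add_comm, Nat.add_div_right _ (by norm_num)]
      rw [this]; ring_nf
    rw [Finset.sum_congr rfl h2, h1, hmin]
    push_cast
    ring
  · -- period k is the last one reached: pvF (k+1) h = 0, all terms are pvQ k
    have hz : pvF (k + 1) h = 0 := pvF_zero_of_lt (k + 1) h (by omega)
    have hmin : min (25920 * (k : Int) + 25920 - 1) h = h := by omega
    have hn : ((h + 1 - 25920 * (k : Int)).toNat : Int) = h + 1 - 25920 * (k : Int) := by omega
    have hle : (h + 1 - 25920 * (k : Int)).toNat ≤ 25920 := by omega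
    rw [hz, add_zero, hmin]
    unfold pvF
    rw [Finset.sum_congr rfl (fun i hi => by
      rw [Nat.div_eq_of_lt (lt_of_lt_of_le (Finset.mem_range.mp hi) hle)])]
    simp only [Nat.add_zero, Finset.sum_const, Finset.card_range, nsmul_eq_mul]
    rw [hn]
    ring

theorem pvLoopA_sum (n : Nat) : ∀ (t c h : Int), n = (h + 1 - c).toNat →
    pvLoopA n t c h = t + ∑ i ∈ Finset.range n, get_block_reward (c + i) := by
  induction n with
  | zero => intro t c h _; simp [pvLoopA]
  | succ f ih =>
    intro t c h hn
    have hc : c ≤ h := by omega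
    have hf : f = (h + 1 - (c + 1)).toNat := by omega
    simp only [pvLoopA, if_pos hc]
    rw [ih _ (c + 1) h hf, Finset.sum_range_succ']
    push_cast
    ring_nf

theorem pvLoopB_sum (f : Nat) : ∀ (k : Nat) (t h : Int), 7 ≤ f + k →
    pvLoopB f t (pvQ k) (25920 * (k : Int)) h = t + pvF k h := by
  induction f with
  | zero =>
    intro k t h hk
    have h6 : 6 + (k - 6) = k := by omega
    have hq0 : pvQ k = 0 := by rw [← h6]; exact pvQ_add_zero 6 (k - 6) (by decide)
    rw [pvF_zero_of_qzero k h hq0]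
    simp [pvLoopB]
  | succ g ih =>
    intro k t h hk
    by_cases hg : pvQ k > 0 ∧ 25920 * (k : Int) ≤ h
    · simp only [pvLoopB, if_pos hg]
      have e1 : PySem.Int.floordiv (pvQ k) 2 = pvQ (k + 1) := (pvHalve_succ' k 50).symm
      have e2 : 25920 * (k : Int) + 25920 = 25920 * ((k + 1 : Nat) : Int) := by push_cast; ring
      have hcall : pvLoopB g
          (t + pvQ k * (min (25920 * (k : Int) + 25920 - 1) h - 25920 * (k : Int) + 1))
          (pvQ (k + 1)) (25920 * (k : Int) + 25920) h
          = (t + pvQ k * (min (25920 * (k : Int) + 25920 - 1) h - 25920 * (k : Int) + 1))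
            + pvF (k + 1) h := by
        rw [e2]; exact ih (k + 1) _ h (by omega)
      rw [e1, hcall, pvF_step k h hg.2]
      ring
    · simp only [pvLoopB, if_neg hg]
      rcases not_and_or.mp hg with hq | hh
      · have hq0 : pvQ k = 0 := le_antisymm (by omega) (pvQ_nonneg k)
        rw [pvF_zero_of_qzero k h hq0]; ring
      · rw [pvF_zero_of_lt k h (by omega)]; ring

theorem gbr_eq (i : Nat) : get_block_reward (i : Int) = pvQ (i / 25920) := by
  unfold get_block_reward pvQ
  norm_num
  rw [show (((i : Int)) / 25920).toNat = i / 25920 by omega]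

theorem sideA (h : Int) : pvLoopA (h + 1).toNat 0 0 h = pvF 0 h := by
  rw [pvLoopA_sum (h + 1).toNat 0 0 h (by omega), zero_add]
  unfold pvF
  simp only [Nat.cast_zero, mul_zero, sub_zero, Nat.zero_add]
  exact Finset.sum_congr rfl (fun i _ => by rw [zero_add, gbr_eq])

theorem sideB (h : Int) : pvLoopB 7 0 50 0 h = pvF 0 h := by
  have := pvLoopB_sum 7 0 0 h (by omega)
  simp only [Nat.cast_zero, mul_zero] at this
  rw [show (50 : Int) = pvQ 0 from rfl, this]
  ring

-- ===== VERDICT (by name: the statement is the Claim_ definition above) =====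
theorem get_total_supply_at_height_spec : Claim_equal_get_total_supply_at_height := by
  intro h _
  unfold Spec_get_total_supply_at_height get_total_supply_at_height get_total_supply_at_height_alt
  rw [sideA, sideB]
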